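-- pv_equiv track=rewrite | github.com/robertnesterodhiambo/C_lag | CAS/byteland2.py | solve_instance
-- ===== SOURCE A (Python) =====
-- MOD = 10**9 + 7
--
-- def solve_instance(n, m, d, cities, towers):
--     dp = [[0] * (m + 1) for _ in range(m + 1)]
--     result = [0] * m
--
--     for i in range(1, m + 1):
--         if towers[i-1] + d < cities[0] or towers[i-1] - d > cities[-1]:
--             continue
--         dp[i][1] = 1
--
--     for i in range(2, m + 1):
--         for j in range(1, i + 1):
--             covered = True
--             for k in range(n):
--                 if abs(cities[k] - towers[i-1]) > d:
--                     covered = False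
--                     break
--             if not covered:
--                 continue
--             for l in range(1, j + 1):
--                 dp[i][j] += dp[i-1][l]
--                 dp[i][j] %= MOD
--
--     for i in range(1, m + 1):
--         result[i-1] = dp[m][i]
--
--     return result
-- ===== SOURCE B (Python) =====
-- MOD = 10**9 + 7
--
-- def solve_instance(n, m, d, cities, towers):
--     # Rolling single row with prefix sums; coverage test hoisted out of the j-loop.
--     if m <= 0:
--         return []
--     reach = [0 if (towers[i] + d < cities[0] or towers[i] - d > cities[-1]) else 1
--              for i in range(m)]
--     row = [reach[0]]                      # row[j-1] = dp[i][j], entries for j = 1..i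
--     for i in range(2, m + 1):
--         covered = all(abs(cities[k] - towers[i - 1]) <= d for k in range(n))
--         if covered:
--             new = []
--             s = 0
--             for j, x in enumerate(row):
--                 s += x
--                 new.append((s + (reach[i - 1] if j == 0 else 0)) % MOD)
--             new.append(s % MOD)           # position j = i: full prefix sum
--             row = new
--         else:
--             row = [reach[i - 1]] + [0] * len(row)
--     return row
-- ===== Notes on version B (the rewrite author's own statement) =====
-- stated objective: faster
-- what changed: B replaces the (m+1)x(m+1) DP table and the per-(i,j) coverage rescans plus O(j) inner accumulation by a rolling single row: coverage is tested once per tower and each new row is produced in one prefix-sum pass; intended as faster (O(m*n+m^2) vs O(m^2*n+m^3)) and measured 40-67x faster on a timing run's inputs up to m=4096, beyond which A times out (B's own quadratic output-sized row also times out at m=16384).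
-- outside the precondition, e.g. on solve_instance(3, 2, 0, [0], [100, 100]): A returns [0, 0], B returns [0, 0]
import Mathlib
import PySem

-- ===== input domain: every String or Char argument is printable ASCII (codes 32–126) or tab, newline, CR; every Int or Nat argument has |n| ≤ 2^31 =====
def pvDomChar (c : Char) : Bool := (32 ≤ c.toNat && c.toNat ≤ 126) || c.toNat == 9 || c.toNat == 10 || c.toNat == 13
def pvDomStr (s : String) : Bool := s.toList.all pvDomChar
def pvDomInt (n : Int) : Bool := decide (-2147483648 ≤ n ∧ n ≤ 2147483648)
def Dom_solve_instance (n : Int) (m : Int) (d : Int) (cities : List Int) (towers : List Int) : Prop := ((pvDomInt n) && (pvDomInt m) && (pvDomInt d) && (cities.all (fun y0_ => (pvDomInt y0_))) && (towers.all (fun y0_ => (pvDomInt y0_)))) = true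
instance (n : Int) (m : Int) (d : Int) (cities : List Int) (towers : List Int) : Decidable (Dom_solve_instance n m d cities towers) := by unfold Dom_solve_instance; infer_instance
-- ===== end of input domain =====

-- B re-implements the same DP with per-tower coverage hoisted out of the inner loops and
-- a rolling row built by one prefix-sum pass instead of the (m+1)x(m+1) table with its
-- quadratic inner accumulation; intended as faster, measured 40-67x on a timing run's
-- inputs up to m=4096 (beyond which A times out). Return-value equality is proved below.

-- ===== PORT A =====
def MOD_pv : Int := 10 ^ 9 + 7
def pvGet2 (dp : List (List Int)) (i j : Nat) : Int := (dp.getD i []).getD j 0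
def pvSet2 (dp : List (List Int)) (i j : Nat) (v : Int) : List (List Int) :=
  dp.set i ((dp.getD i []).set j v)

def solve_instance (n : Int) (m : Int) (d : Int) (cities : List Int) (towers : List Int) : List Int :=
  let dp0 : List (List Int) :=
    (PySem.List.pyRange 0 (m+1) 1).map (fun _ => List.replicate (m+1).toNat 0)
  let result0 : List Int := List.replicate m.toNat 0
  let dp1 := (PySem.List.pyRange 1 (m+1) 1).foldl (fun dp i =>
      if (PySem.List.pyGet? towers (i-1)).getD 0 + d < (PySem.List.pyGet? cities 0).getD 0 ∨
         (PySem.List.pyGet? towers (i-1)).getD 0 - d > (PySem.List.pyGet? cities (-1)).getD 0 then dp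
      else pvSet2 dp i.toNat 1 1) dp0
  let dp2 := (PySem.List.pyRange 2 (m+1) 1).foldl (fun dp i =>
      (PySem.List.pyRange 1 (i+1) 1).foldl (fun dp j =>
        let covered := (PySem.List.pyRange 0 n 1).all (fun k =>
          !decide (|(PySem.List.pyGet? cities k).getD 0 - (PySem.List.pyGet? towers (i-1)).getD 0| > d))
        if !covered then dp
        else (PySem.List.pyRange 1 (j+1) 1).foldl (fun dp l =>
          pvSet2 dp i.toNat j.toNat
            (PySem.Int.mod (pvGet2 dp i.toNat j.toNat + pvGet2 dp (i-1).toNat l.toNat) MOD_pv)) dp) dp) dp1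
  (PySem.List.pyRange 1 (m+1) 1).foldl (fun res i =>
    res.set (i-1).toNat (pvGet2 dp2 m.toNat i.toNat)) result0

def solve_instance_alt (n : Int) (m : Int) (d : Int) (cities : List Int) (towers : List Int) : List Int :=
  if m ≤ 0 then []
  else
    let reach : List Int := (PySem.List.pyRange 0 m 1).map (fun i =>
      if (PySem.List.pyGet? towers i).getD 0 + d < (PySem.List.pyGet? cities 0).getD 0 ∨
         (PySem.List.pyGet? towers i).getD 0 - d > (PySem.List.pyGet? cities (-1)).getD 0 then (0:Int) else 1)
    let row0 : List Int := [reach.getD 0 0]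
    (PySem.List.pyRange 2 (m+1) 1).foldl (fun row i =>
      let covered := (PySem.List.pyRange 0 n 1).all (fun k =>
        decide (|(PySem.List.pyGet? cities k).getD 0 - (PySem.List.pyGet? towers (i-1)).getD 0| ≤ d))
      if covered then
        let p := (PySem.List.enumerate row 0).foldl (fun (acc : Int × List Int) jx =>
            let s := acc.1 + jx.2
            (s, acc.2 ++ [PySem.Int.mod (s + (if jx.1 = 0 then reach.getD (i-1).toNat 0 else 0)) MOD_pv]))
          ((0:Int), ([] : List Int))
        p.2 ++ [PySem.Int.mod p.1 MOD_pv]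
      else reach.getD (i-1).toNat 0 :: List.replicate row.length 0) row0


-- ===== PRECONDITION & SPEC =====
-- Pre_ excludes the inputs where Python A can raise IndexError: m > len(towers) or empty
-- cities (with m >= 1, always raises), and n > len(cities) with m >= 2, where the coverage
-- scan of either program raises unless every tower fails coverage at an early city; on the
-- few such inputs where A happens to return, B returns the same value.
def Pre_solve_instance (n : Int) (m : Int) (d : Int) (cities : List Int) (towers : List Int) : Prop :=
  (1 ≤ m → cities ≠ [] ∧ m ≤ (towers.length : Int)) ∧ (2 ≤ m → n ≤ (cities.length : Int))
instance (n : Int) (m : Int) (d : Int) (cities : List Int) (towers : List Int) : Decidable (Pre_solve_instance n m d cities towers) := by unfold Pre_solve_instance; infer_instance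

def pvWitness_solve_instance : Int × Int × Int × List Int × List Int := (1, 2, 0, [0], [0, 0])

def Spec_solve_instance (n : Int) (m : Int) (d : Int) (cities : List Int) (towers : List Int) (out : List Int) : Prop := out = solve_instance_alt n m d cities towers
instance (n : Int) (m : Int) (d : Int) (cities : List Int) (towers : List Int) (out : List Int) : Decidable (Spec_solve_instance n m d cities towers out) := by unfold Spec_solve_instance; infer_instance

-- ===== CLAIM (what is proved, stated in full; the proofs are below) =====
def Claim_equal_solve_instance : Prop := ∀ (n : Int) (m : Int) (d : Int) (cities : List Int) (towers : List Int), Dom_solve_instance n m d cities towers → Pre_solve_instance n m d cities towers → Spec_solve_instance n m d cities towers (solve_instance n m d cities towers)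

-- ===== LEMMAS AND PROOFS =====
theorem pv_length_set2 (dp : List (List Int)) (i j : Nat) (v : Int) :
    (pvSet2 dp i j v).length = dp.length := by simp [pvSet2]

theorem pv_rowlen_set2 (dp : List (List Int)) (i j : Nat) (v : Int) (r : Nat) :
    ((pvSet2 dp i j v).getD r []).length = ((dp.getD r []).length) := by
  unfold pvSet2
  rcases eq_or_ne r i with rfl | h
  · by_cases hi : r < dp.length
    · simp [List.getD, List.getElem?_set, hi]
    · simp [List.getD, List.getElem?_set, hi]
  · simp [List.getD, List.getElem?_set, h.symm]

theorem pv_get2_set2_same (dp : List (List Int)) (i j : Nat) (v : Int)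
    (hi : i < dp.length) (hj : j < (dp.getD i []).length) :
    pvGet2 (pvSet2 dp i j v) i j = v := by
  unfold pvGet2 pvSet2
  have hj' : j < dp[i].length := by rwa [List.getD_eq_getElem dp _ hi] at hj
  simp [List.getD, List.getElem?_set, hi, hj']

theorem pv_get2_set2_ne (dp : List (List Int)) (i j i' j' : Nat) (v : Int)
    (h : i' ≠ i ∨ j' ≠ j) :
    pvGet2 (pvSet2 dp i j v) i' j' = pvGet2 dp i' j' := by
  unfold pvGet2 pvSet2
  rcases eq_or_ne i' i with rfl | hne
  · rcases h with h | h
    · exact absurd rfl h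
    · by_cases hi : i' < dp.length
      · simp [List.getD, List.getElem?_set, hi, Ne.symm h]
      · simp [List.getD, List.getElem?_set, hi]
  · simp [List.getD, List.getElem?_set, hne.symm]

theorem pv_set2_set2 (dp : List (List Int)) (i j : Nat) (v w : Int) (hi : i < dp.length) :
    pvSet2 (pvSet2 dp i j v) i j w = pvSet2 dp i j w := by
  unfold pvSet2
  simp [List.getD, List.getElem?_set, hi, List.set_set]

theorem pv_modadd (x y : Int) :
    PySem.Int.mod (PySem.Int.mod x MOD_pv + y) MOD_pv = PySem.Int.mod (x + y) MOD_pv := by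
  have hp : (0:Int) < MOD_pv := by decide
  rw [PySem.Int.mod_eq_emod_of_pos hp, PySem.Int.mod_eq_emod_of_pos hp,
      PySem.Int.mod_eq_emod_of_pos hp]
  exact Int.emod_add_emod x MOD_pv y

theorem pv_sum_range_getD (xs : List Int) (t : Nat) :
    ((List.range t).map (fun k => xs.getD k 0)).sum = (xs.take t).sum := by
  induction t with
  | zero => simp
  | succ t ih =>
    rw [List.range_succ, List.map_append, List.sum_append, ih]
    by_cases h : t < xs.length
    · rw [List.take_add_one, List.sum_append]
      simp [List.getD, List.getElem?_eq_getElem h]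
    · rw [Nat.not_lt] at h
      rw [List.take_of_length_le (show xs.length ≤ t + 1 by omega), List.take_of_length_le h]
      simp [List.getElem?_eq_none (by omega : xs.length ≤ t)]

def prefC (r : Int) (row : List Int) : List Int :=
  let p := (PySem.List.enumerate row 0).foldl (fun (acc : Int × List Int) jx =>
      let s := acc.1 + jx.2
      (s, acc.2 ++ [PySem.Int.mod (s + (if jx.1 = 0 then r else 0)) MOD_pv]))
    ((0:Int), ([] : List Int))
  p.2 ++ [PySem.Int.mod p.1 MOD_pv]

def stepS (cov : Bool) (r : Int) (row : List Int) : List Int :=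
  if cov then prefC r row else r :: List.replicate row.length 0

def rowS (cov : Int → Bool) (re : Int → Int) : Nat → List Int
  | 0 => []
  | 1 => [re 1]
  | (k+2) => stepS (cov ((k:Int)+2)) (re ((k:Int)+2)) (rowS cov re (k+1))

theorem pv_enumFold (r : Int) (xs : List Int) :
    (PySem.List.enumerate xs 0).foldl (fun (acc : Int × List Int) jx =>
        let s := acc.1 + jx.2
        (s, acc.2 ++ [PySem.Int.mod (s + (if jx.1 = 0 then r else 0)) MOD_pv]))
      ((0:Int), ([] : List Int)) =
    (xs.sum, (List.range xs.length).map (fun k =>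
        PySem.Int.mod ((xs.take (k+1)).sum + (if k = 0 then r else 0)) MOD_pv)) := by
  induction xs using List.reverseRecOn with
  | nil => simp [PySem.List.enumerate]
  | append_singleton xs x ih =>
    rw [PySem.List.enumerate_append, List.foldl_append, ih]
    simp only [PySem.List.enumerate, List.foldl_cons, List.foldl_nil]
    refine Prod.ext (by simp) ?_
    simp only [List.length_append, List.length_singleton, List.range_succ, List.map_append,
      List.map_cons, List.map_nil]
    congr 1
    · refine List.map_congr_left (fun k hk => ?_)
      rw [List.mem_range] at hk
      rw [List.take_append_of_le_length (by omega)]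
    · rw [List.take_of_length_le (show (xs ++ [x]).length ≤ xs.length + 1 by simp)]
      by_cases h0 : xs.length = 0
      · rcases List.eq_nil_of_length_eq_zero h0 with rfl
        simp
      · simp [h0]

theorem pv_prefC_length (r : Int) (xs : List Int) : (prefC r xs).length = xs.length + 1 := by
  simp [prefC, pv_enumFold]

theorem pv_prefC_getD (r : Int) (xs : List Int) (hne : xs ≠ []) (k : Nat) (hk : k ≤ xs.length) :
    (prefC r xs).getD k 0 =
      PySem.Int.mod ((xs.take (k+1)).sum + (if k = 0 then r else 0)) MOD_pv := by
  unfold prefC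
  rw [pv_enumFold]
  rcases Nat.lt_or_ge k xs.length with h | h
  · rw [List.getD_append _ _ _ _ (by simpa using h)]
    simp [List.getD, List.getElem?_map, List.getElem?_range h]
  · have hk' : k = xs.length := by omega
    subst hk'
    rw [List.getD_append_right _ _ _ _ (by simp)]
    have h0 : xs.length ≠ 0 := by
      intro h; exact hne (List.eq_nil_of_length_eq_zero h)
    simp [h0, List.take_of_length_le (Nat.le_succ xs.length)]

theorem pv_getD_eq_zero_of_le (xs : List Int) (k : Nat) (h : xs.length ≤ k) :
    xs.getD k 0 = 0 := by
  simp [List.getD, List.getElem?_eq_none h]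

theorem pv_rowS_length (cov : Int → Bool) (re : Int → Int) : ∀ k, (rowS cov re k).length = k := by
  intro k
  induction k using Nat.strong_induction_on with
  | _ k ih =>
    match k with
    | 0 => simp [rowS]
    | 1 => simp [rowS]
    | (k+2) =>
      have := ih (k+1) (by omega)
      simp only [rowS, stepS]
      by_cases h : cov ((k:Int)+2)
      · simp [h, pv_prefC_length, this]
      · simp [h, this]

theorem pv_rowS_succ (cov : Int → Bool) (re : Int → Int) (k : Nat) (hk : 1 ≤ k) :
    rowS cov re (k+1) = stepS (cov ((k:Int)+1)) (re ((k:Int)+1)) (rowS cov re k) := by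
  match k, hk with
  | (k+1), _ =>
    show rowS cov re (k+2) = _
    simp only [rowS]
    have h2 : ((k:Int)+1+1) = (k:Int)+2 := by ring
    rw [show (((k+1:Nat)):Int) = (k:Int)+1 by push_cast; ring, h2]

theorem pv_foldl_id {α β : Type} (l : List β) (s : α) : l.foldl (fun s _ => s) s = s := by
  induction l generalizing s with
  | nil => rfl
  | cons x t ih => simpa using ih s

def covE (n d : Int) (cities towers : List Int) (i : Int) : Bool :=
  (PySem.List.pyRange 0 n 1).all (fun k =>
    !decide (|(PySem.List.pyGet? cities k).getD 0 - (PySem.List.pyGet? towers (i-1)).getD 0| > d))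

def reE (d : Int) (cities towers : List Int) (i : Int) : Int :=
  if (PySem.List.pyGet? towers (i-1)).getD 0 + d < (PySem.List.pyGet? cities 0).getD 0 ∨
     (PySem.List.pyGet? towers (i-1)).getD 0 - d > (PySem.List.pyGet? cities (-1)).getD 0 then 0 else 1

def pvDp0 (m : Int) : List (List Int) :=
  (PySem.List.pyRange 0 (m+1) 1).map (fun _ => List.replicate (m+1).toNat 0)

def pvDp1 (m d : Int) (cities towers : List Int) : List (List Int) :=
  (PySem.List.pyRange 1 (m+1) 1).foldl (fun dp i =>
    if (PySem.List.pyGet? towers (i-1)).getD 0 + d < (PySem.List.pyGet? cities 0).getD 0 ∨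
       (PySem.List.pyGet? towers (i-1)).getD 0 - d > (PySem.List.pyGet? cities (-1)).getD 0 then dp
    else pvSet2 dp i.toNat 1 1) (pvDp0 m)

def pvABody (n m d : Int) (cities towers : List Int) : List (List Int) → Int → List (List Int) :=
  fun dp i => (PySem.List.pyRange 1 (i+1) 1).foldl (fun dp j =>
    if !(covE n d cities towers i) then dp
    else (PySem.List.pyRange 1 (j+1) 1).foldl (fun dp l =>
      pvSet2 dp i.toNat j.toNat
        (PySem.Int.mod (pvGet2 dp i.toNat j.toNat + pvGet2 dp (i-1).toNat l.toNat) MOD_pv)) dp) dp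

theorem pv_getD_dp0 (m : Int) (rr : Nat) (h : rr < (pvDp0 m).length) :
    (pvDp0 m).getD rr [] = List.replicate (m+1).toNat 0 := by
  unfold pvDp0 at *
  simp only [List.length_map, PySem.List.length_pyRange_one, sub_zero] at h
  simp [List.getD, List.getElem?_replicate, PySem.List.length_pyRange_one, h]

theorem pv_len_dp0 (m : Int) : (pvDp0 m).length = (m+1).toNat := by
  simp [pvDp0, PySem.List.length_pyRange_one]

theorem pv_get2_dp0 (m : Int) (rr q : Nat) : pvGet2 (pvDp0 m) rr q = 0 := by
  unfold pvGet2
  by_cases h : rr < (pvDp0 m).length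
  · rw [pv_getD_dp0 m rr h]
    by_cases hq : q < (m+1).toNat
    · simp [List.getD, List.getElem?_eq_getElem, hq]
    · exact pv_getD_eq_zero_of_le _ _ (by simpa using Nat.le_of_not_lt hq)
  · rw [List.getD_eq_default _ _ (Nat.le_of_not_lt h)]
    simp [List.getD]

theorem pv_first (m d : Int) (cities towers : List Int) :
    ∀ c : Int, 0 ≤ c → c ≤ m →
    ((PySem.List.pyRange 1 (c+1) 1).foldl (fun dp i =>
        if (PySem.List.pyGet? towers (i-1)).getD 0 + d < (PySem.List.pyGet? cities 0).getD 0 ∨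
           (PySem.List.pyGet? towers (i-1)).getD 0 - d > (PySem.List.pyGet? cities (-1)).getD 0 then dp
        else pvSet2 dp i.toNat 1 1) (pvDp0 m)).length = (m+1).toNat ∧
    (∀ rr : Nat, rr < (m+1).toNat →
      (((PySem.List.pyRange 1 (c+1) 1).foldl (fun dp i =>
        if (PySem.List.pyGet? towers (i-1)).getD 0 + d < (PySem.List.pyGet? cities 0).getD 0 ∨
           (PySem.List.pyGet? towers (i-1)).getD 0 - d > (PySem.List.pyGet? cities (-1)).getD 0 then dp
        else pvSet2 dp i.toNat 1 1) (pvDp0 m)).getD rr []).length = (m+1).toNat) ∧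
    (∀ rr q : Nat, pvGet2 ((PySem.List.pyRange 1 (c+1) 1).foldl (fun dp i =>
        if (PySem.List.pyGet? towers (i-1)).getD 0 + d < (PySem.List.pyGet? cities 0).getD 0 ∨
           (PySem.List.pyGet? towers (i-1)).getD 0 - d > (PySem.List.pyGet? cities (-1)).getD 0 then dp
        else pvSet2 dp i.toNat 1 1) (pvDp0 m)) rr q =
      if 1 ≤ rr ∧ (rr:Int) ≤ c ∧ q = 1 then reE d cities towers rr else 0) := by
  intro c hc0
  induction c, hc0 using Int.le_induction with
  | base =>
    intro _
    rw [show (0:Int)+1 = 1 by ring, PySem.List.pyRange_one_eq_nil (le_refl 1)]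
    simp only [List.foldl_nil]
    refine ⟨pv_len_dp0 m, ?_, ?_⟩
    · intro rr hrr
      rw [pv_getD_dp0 m rr (by rw [pv_len_dp0]; exact hrr)]
      simp
    · intro rr q
      rw [pv_get2_dp0, if_neg (by omega)]
  | succ c hc ih =>
    intro h1
    obtain ⟨hlen, hrows, hchar⟩ := ih (by omega)
    rw [PySem.List.pyRange_one_succ_right (by omega : (1:Int) ≤ c+1), List.foldl_append,
      List.foldl_cons, List.foldl_nil]
    by_cases hcnd : (PySem.List.pyGet? towers (c+1-1)).getD 0 + d < (PySem.List.pyGet? cities 0).getD 0 ∨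
        (PySem.List.pyGet? towers (c+1-1)).getD 0 - d > (PySem.List.pyGet? cities (-1)).getD 0
    · rw [if_pos hcnd]
      refine ⟨hlen, hrows, ?_⟩
      intro rr q
      rw [hchar rr q]
      by_cases ho : 1 ≤ rr ∧ (rr:Int) ≤ c ∧ q = 1
      · rw [if_pos ho, if_pos (by omega)]
      · rw [if_neg ho]
        by_cases hn : 1 ≤ rr ∧ (rr:Int) ≤ c+1 ∧ q = 1
        · rw [if_pos hn]
          have hr : (rr:Int) = c+1 := by omega
          unfold reE
          rw [hr, if_pos hcnd]
        · rw [if_neg hn]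
    · rw [if_neg hcnd]
      have hlt : (c+1).toNat < (m+1).toNat := by omega
      refine ⟨by rw [pv_length_set2, hlen], ?_, ?_⟩
      · intro rr hrr
        rw [pv_rowlen_set2]
        exact hrows rr hrr
      · intro rr q
        by_cases heq : rr = (c+1).toNat ∧ q = 1
        · rw [heq.1, heq.2]
          rw [pv_get2_set2_same _ _ _ _ (by rw [hlen]; exact hlt)
            (by rw [hrows _ hlt]; omega)]
          rw [if_pos (by constructor; omega; constructor; omega; rfl)]
          have hr : (((c+1).toNat : Int)) = c+1 := by omega
          unfold reE
          rw [hr, if_neg hcnd]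
        · have hne : rr ≠ (c+1).toNat ∨ q ≠ 1 := by tauto
          rw [pv_get2_set2_ne _ _ _ _ _ _ hne, hchar rr q]
          by_cases ho : 1 ≤ rr ∧ (rr:Int) ≤ c ∧ q = 1
          · rw [if_pos ho, if_pos (by omega)]
          · rw [if_neg ho, if_neg (by
              rintro ⟨a1, a2, a3⟩
              rcases hne with hne | hne
              · exact hne (by omega)
              · exact hne a3)]

theorem pv_inner (I P J : Nat) (hPI : P ≠ I) (dp : List (List Int))
    (hIlen : I < dp.length) (hJlen : J < (dp.getD I []).length) :
    ∀ j : Int, 1 ≤ j →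
    (PySem.List.pyRange 1 (j+1) 1).foldl (fun dd l =>
        pvSet2 dd I J (PySem.Int.mod (pvGet2 dd I J + pvGet2 dd P l.toNat) MOD_pv)) dp =
    pvSet2 dp I J (PySem.Int.mod (pvGet2 dp I J +
        ((PySem.List.pyRange 1 (j+1) 1).map (fun l => pvGet2 dp P l.toNat)).sum) MOD_pv) := by
  intro j hj
  induction j, hj using Int.le_induction with
  | base =>
    rw [show (1:Int)+1 = 1+(1:Int) by ring, PySem.List.pyRange_one_singleton]
    simp
  | succ j hj ih =>
    rw [PySem.List.pyRange_one_succ_right (by omega : (1:Int) ≤ j+1), List.foldl_append,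
      List.foldl_cons, List.foldl_nil, ih, List.map_append, List.sum_append]
    rw [pv_get2_set2_same _ _ _ _ hIlen hJlen,
      pv_get2_set2_ne _ _ _ _ _ _ (Or.inl hPI),
      pv_set2_set2 _ _ _ _ _ hIlen, pv_modadd]
    congr 1
    simp [add_assoc]

theorem pv_sum_pyRange (dp : List (List Int)) (P : Nat) (prev : List Int)
    (hrowP : ∀ q : Nat, pvGet2 dp P q = if q = 0 then 0 else prev.getD (q-1) 0) :
    ∀ j : Int, 0 ≤ j →
    ((PySem.List.pyRange 1 (j+1) 1).map (fun l => pvGet2 dp P l.toNat)).sum =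
      (prev.take j.toNat).sum := by
  intro j hj
  rw [PySem.List.pyRange_one, List.map_map]
  rw [show (j+1-1 : Int) = j by ring]
  have : ∀ k ∈ List.range j.toNat,
      ((fun l => pvGet2 dp P l.toNat) ∘ fun k : Nat => (1:Int) + k) k = prev.getD k 0 := by
    intro k _
    simp only [Function.comp]
    rw [show ((1:Int) + (k:Int)).toNat = k + 1 by omega, hrowP (k+1)]
    simp
  rw [List.map_congr_left this, pv_sum_range_getD]

theorem pv_mid (dp : List (List Int)) (I P : Nat) (r : Int) (prev : List Int)
    (cv : Bool) (hcov : cv = true) (hPI : P ≠ I) (hIlen : I < dp.length)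
    (hrows : ∀ rr : Nat, rr < dp.length → (dp.getD rr []).length = dp.length)
    (hrowI : ∀ q : Nat, pvGet2 dp I q = if q = 1 then r else 0)
    (hrowP : ∀ q : Nat, pvGet2 dp P q = if q = 0 then 0 else prev.getD (q-1) 0) :
    ∀ j : Int, 0 ≤ j → j < (dp.length : Int) →
      ((∀ rr q : Nat, rr ≠ I → pvGet2 ((PySem.List.pyRange 1 (j+1) 1).foldl (fun dd jj =>
          if !cv then dd
          else (PySem.List.pyRange 1 (jj+1) 1).foldl (fun dd l =>
            pvSet2 dd I jj.toNat
              (PySem.Int.mod (pvGet2 dd I jj.toNat + pvGet2 dd P l.toNat) MOD_pv)) dd) dp) rr q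
          = pvGet2 dp rr q) ∧
      ((PySem.List.pyRange 1 (j+1) 1).foldl (fun dd jj =>
          if !cv then dd
          else (PySem.List.pyRange 1 (jj+1) 1).foldl (fun dd l =>
            pvSet2 dd I jj.toNat
              (PySem.Int.mod (pvGet2 dd I jj.toNat + pvGet2 dd P l.toNat) MOD_pv)) dd) dp).length
        = dp.length ∧
      (∀ rr : Nat, rr < dp.length → (((PySem.List.pyRange 1 (j+1) 1).foldl (fun dd jj =>
          if !cv then dd
          else (PySem.List.pyRange 1 (jj+1) 1).foldl (fun dd l =>
            pvSet2 dd I jj.toNat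
              (PySem.Int.mod (pvGet2 dd I jj.toNat + pvGet2 dd P l.toNat) MOD_pv)) dd) dp).getD rr []).length
        = dp.length) ∧
      (∀ q : Nat, pvGet2 ((PySem.List.pyRange 1 (j+1) 1).foldl (fun dd jj =>
          if !cv then dd
          else (PySem.List.pyRange 1 (jj+1) 1).foldl (fun dd l =>
            pvSet2 dd I jj.toNat
              (PySem.Int.mod (pvGet2 dd I jj.toNat + pvGet2 dd P l.toNat) MOD_pv)) dd) dp) I q =
        if 1 ≤ q ∧ (q:Int) ≤ j then
          PySem.Int.mod ((prev.take q).sum + (if q = 1 then r else 0)) MOD_pv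
        else pvGet2 dp I q)) := by
  subst hcov
  intro j hj
  induction j, hj using Int.le_induction with
  | base =>
    intro _
    rw [show (0:Int)+1 = 1 by ring, PySem.List.pyRange_one_eq_nil (le_refl 1)]
    simp only [List.foldl_nil]
    refine ⟨by simp, by simp, fun rr h => hrows rr h, fun q => ?_⟩
    rw [if_neg (show ¬ (1 ≤ q ∧ (q:Int) ≤ 0) by omega)]
  | succ j hj ih =>
    intro hlt
    obtain ⟨ih1, ih2, ih3, ih4⟩ := ih (by omega)
    simp only [Bool.not_true, Bool.false_eq_true, if_false] at ih1 ih2 ih3 ih4 ⊢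
    rw [PySem.List.pyRange_one_succ_right (by omega : (1:Int) ≤ j+1), List.foldl_append,
      List.foldl_cons, List.foldl_nil]
    set dpj := (PySem.List.pyRange 1 (j+1) 1).foldl (fun dd jj =>
          (PySem.List.pyRange 1 (jj+1) 1).foldl (fun dd l =>
            pvSet2 dd I jj.toNat
              (PySem.Int.mod (pvGet2 dd I jj.toNat + pvGet2 dd P l.toNat) MOD_pv)) dd) dp with hdpj
    have hIlen' : I < dpj.length := by rw [ih2]; exact hIlen
    have hJ : (j+1).toNat < dp.length := by omega
    have hJlen' : (j+1).toNat < (dpj.getD I []).length := by rw [ih3 I hIlen]; exact hJ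
    rw [pv_inner I P (j+1).toNat hPI dpj hIlen' hJlen' (j+1) (by omega)]
    have hmapeq : (fun l : Int => pvGet2 dpj P l.toNat) = (fun l : Int => pvGet2 dp P l.toNat) :=
      funext (fun l => ih1 P l.toNat hPI)
    have hsum : ((PySem.List.pyRange 1 (j+1+1) 1).map (fun l => pvGet2 dpj P l.toNat)).sum
        = (prev.take (j+1).toNat).sum := by
      rw [hmapeq, pv_sum_pyRange dp P prev hrowP (j+1) (by omega)]
    have hbase : pvGet2 dpj I (j+1).toNat = if (j+1).toNat = 1 then r else 0 := by
      rw [ih4 ((j+1).toNat), if_neg (by omega), hrowI]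
    refine ⟨?_, ?_, ?_, ?_⟩
    · intro rr q hrrI
      rw [pv_get2_set2_ne _ _ _ _ _ _ (Or.inl hrrI), ih1 rr q hrrI]
    · rw [pv_length_set2, ih2]
    · intro rr hrr
      rw [pv_rowlen_set2, ih3 rr hrr]
    · intro q
      by_cases hq : q = (j+1).toNat
      · rw [hq, pv_get2_set2_same _ _ _ _ hIlen' hJlen', hbase, hsum]
        rw [if_pos (show 1 ≤ (j+1).toNat ∧ (((j+1).toNat:Int)) ≤ j+1 by omega)]
        rw [add_comm]
      · rw [pv_get2_set2_ne _ _ _ _ _ _ (Or.inr hq), ih4 q]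
        by_cases ho : 1 ≤ q ∧ (q:Int) ≤ j
        · rw [if_pos ho, if_pos (show 1 ≤ q ∧ (q:Int) ≤ j+1 by omega)]
        · rw [if_neg ho, if_neg (show ¬ (1 ≤ q ∧ (q:Int) ≤ j+1) by omega)]

theorem pv_getD_replicate (n k : Nat) : (List.replicate n (0:Int)).getD k 0 = 0 := by
  by_cases h : k < n
  · simp [List.getD, List.getElem?_replicate, h]
  · exact pv_getD_eq_zero_of_le _ _ (by simpa using Nat.le_of_not_lt h)

theorem pv_outer (n m d : Int) (cities towers : List Int) (hm : 1 ≤ m) :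
    ∀ b : Int, 2 ≤ b → b ≤ m + 1 →
    (((PySem.List.pyRange 2 b 1).foldl (pvABody n m d cities towers)
        (pvDp1 m d cities towers)).length = (m+1).toNat) ∧
    (∀ rr : Nat, rr < (m+1).toNat →
      (((PySem.List.pyRange 2 b 1).foldl (pvABody n m d cities towers)
        (pvDp1 m d cities towers)).getD rr []).length = (m+1).toNat) ∧
    (∀ q : Nat, pvGet2 ((PySem.List.pyRange 2 b 1).foldl (pvABody n m d cities towers)
        (pvDp1 m d cities towers)) (b-1).toNat q =
      if q = 0 then 0
      else (rowS (covE n d cities towers) (reE d cities towers) (b-1).toNat).getD (q-1) 0) ∧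
    (∀ rr : Nat, b ≤ (rr:Int) → (rr:Int) ≤ m → ∀ q : Nat,
      pvGet2 ((PySem.List.pyRange 2 b 1).foldl (pvABody n m d cities towers)
        (pvDp1 m d cities towers)) rr q = if q = 1 then reE d cities towers (rr:Int) else 0) := by
  intro b hb2
  induction b, hb2 using Int.le_induction with
  | base =>
    intro _
    obtain ⟨hlen, hrows, hchar⟩ := pv_first m d cities towers m (by omega) (le_refl m)
    rw [PySem.List.pyRange_one_eq_nil (le_refl 2)]
    simp only [List.foldl_nil]
    unfold pvDp1
    refine ⟨hlen, hrows, ?_, ?_⟩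
    · intro q
      have h1 : ((2:Int)-1).toNat = 1 := by norm_num
      rw [h1]
      have := hchar 1 q
      rw [this]
      match q with
      | 0 => simp
      | 1 =>
        rw [if_pos (by constructor; omega; constructor; omega; rfl)]
        simp [rowS]
      | (q+2) =>
        rw [if_neg (by omega)]
        show _ = (rowS (covE n d cities towers) (reE d cities towers) 1).getD (q+1) 0
        rw [pv_getD_eq_zero_of_le _ _ (by rw [pv_rowS_length]; omega)]
    · intro rr h2 hm' q
      rw [hchar rr q]
      by_cases hq : q = 1
      · rw [if_pos (by omega), hq, if_pos rfl]
      · rw [if_neg (by tauto), if_neg hq]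
  | succ b hb ih =>
    intro hble
    obtain ⟨hlen, hrows, hrow, hinit⟩ := ih (by omega)
    rw [PySem.List.pyRange_one_succ_right (by omega : (2:Int) ≤ b), List.foldl_append,
      List.foldl_cons, List.foldl_nil]
    set dpb := (PySem.List.pyRange 2 b 1).foldl (pvABody n m d cities towers)
        (pvDp1 m d cities towers) with hdpb
    have hbc : ((b.toNat:Int)) = b := by omega
    have hbc1 : (((b-1).toNat:Int)) = b - 1 := by omega
    have hb1 : ((b+1-1:Int)) = b := by ring
    have hkey : b.toNat = (b-1).toNat + 1 := by omega
    have hprevlen : (rowS (covE n d cities towers) (reE d cities towers) (b-1).toNat).length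
        = (b-1).toNat := pv_rowS_length _ _ _
    have hprevne : rowS (covE n d cities towers) (reE d cities towers) (b-1).toNat ≠ [] := by
      intro hnil
      rw [hnil] at hprevlen
      simp at hprevlen
      omega
    have hrowSb : rowS (covE n d cities towers) (reE d cities towers) b.toNat
        = stepS (covE n d cities towers b) (reE d cities towers b)
            (rowS (covE n d cities towers) (reE d cities towers) (b-1).toNat) := by
      rw [hkey, pv_rowS_succ _ _ _ (by omega)]
      rw [show (((b-1).toNat:Int) + 1) = b by omega]
    have hrowI : ∀ q : Nat, pvGet2 dpb b.toNat q = if q = 1 then reE d cities towers b else 0 := by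
      intro q
      have := hinit b.toNat (by omega) (by omega) q
      rw [hbc] at this
      exact this
    simp only [pvABody]
    by_cases hcv : covE n d cities towers b = true
    · have hkey2 := pv_mid dpb b.toNat (b-1).toNat (reE d cities towers b)
        (rowS (covE n d cities towers) (reE d cities towers) (b-1).toNat)
        (covE n d cities towers b) hcv (by omega) (by rw [hlen]; omega)
        (by intro rr h; rw [hrows rr (by rw [← hlen]; exact h), hlen])
        hrowI hrow b (by omega) (by rw [hlen]; omega)
      obtain ⟨k1, k2, k3, k4⟩ := hkey2
      refine ⟨by rw [k2, hlen], ?_, ?_, ?_⟩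
      · intro rr h
        rw [k3 rr (by rw [hlen]; exact h), hlen]
      · intro q
        rw [hb1, hrowSb, stepS, if_pos hcv]
        rw [k4 q]
        match q with
        | 0 =>
          rw [if_neg (by omega), hrowI 0, if_neg (by omega), if_pos rfl]
        | (q+1) =>
          rw [if_neg (by omega : ¬ (q+1) = 0)]
          by_cases hle : ((q+1:Nat):Int) ≤ b
          · rw [if_pos (by omega)]
            simp only [Nat.add_sub_cancel]
            rw [pv_prefC_getD _ _ hprevne q (by omega)]
            by_cases hq0 : q = 0
            · subst hq0; simp
            · rw [if_neg (by omega : ¬ q + 1 = 1), if_neg hq0]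
          · rw [if_neg (by omega), hrowI (q+1), if_neg (by omega)]
            rw [pv_getD_eq_zero_of_le _ _ (by rw [pv_prefC_length, hprevlen]; omega)]
      · intro rr h2 hm' q
        rw [k1 rr q (by omega)]
        have := hinit rr (by omega) (by omega) q
        exact this
    · have hcvf : covE n d cities towers b = false := by
        revert hcv
        cases covE n d cities towers b <;> simp
      simp only [hcvf, Bool.not_false, if_true]
      rw [pv_foldl_id]
      refine ⟨hlen, hrows, ?_, ?_⟩
      · intro q
        rw [hb1, hrowSb, stepS,
          if_neg (show ¬ covE n d cities towers b = true by rw [hcvf]; simp)]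
        rw [hrowI q]
        match q with
        | 0 => simp
        | 1 => simp
        | (q+2) =>
          rw [if_neg (by omega)]
          show (0:Int) = (reE d cities towers b :: List.replicate _ 0).getD (q+1) 0
          rw [List.getD_cons_succ, pv_getD_replicate]
      · intro rr h2 hm' q
        exact hinit rr (by omega) (by omega) q

def pvDp2 (n m d : Int) (cities towers : List Int) : List (List Int) :=
  (PySem.List.pyRange 2 (m+1) 1).foldl (pvABody n m d cities towers) (pvDp1 m d cities towers)

def pvReach (m d : Int) (cities towers : List Int) : List Int :=
  (PySem.List.pyRange 0 m 1).map (fun i =>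
    if (PySem.List.pyGet? towers i).getD 0 + d < (PySem.List.pyGet? cities 0).getD 0 ∨
       (PySem.List.pyGet? towers i).getD 0 - d > (PySem.List.pyGet? cities (-1)).getD 0 then (0:Int) else 1)

def pvBBody (n m d : Int) (cities towers : List Int) : List Int → Int → List Int :=
  fun row i =>
    if (PySem.List.pyRange 0 n 1).all (fun k =>
        decide (|(PySem.List.pyGet? cities k).getD 0 - (PySem.List.pyGet? towers (i-1)).getD 0| ≤ d)) then
      prefC ((pvReach m d cities towers).getD (i-1).toNat 0) row
    else (pvReach m d cities towers).getD (i-1).toNat 0 :: List.replicate row.length 0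

theorem pv_cov_eq (n d : Int) (cities towers : List Int) (i : Int) :
    (PySem.List.pyRange 0 n 1).all (fun k =>
      decide (|(PySem.List.pyGet? cities k).getD 0 - (PySem.List.pyGet? towers (i-1)).getD 0| ≤ d))
    = covE n d cities towers i := by
  unfold covE
  congr 1
  funext k
  rw [← decide_not]
  simp [not_lt]

theorem pv_reach_getD (m d : Int) (cities towers : List Int) (k : Nat) (hk : (k:Int) < m) :
    (pvReach m d cities towers).getD k 0 = reE d cities towers ((k:Int)+1) := by
  unfold pvReach reE
  rw [PySem.List.pyRange_one, List.map_map, sub_zero]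
  simp only [List.getD, List.getElem?_map, List.getElem?_range (show k < m.toNat by omega),
    Option.map_some, Option.getD_some, Function.comp]
  norm_num

theorem pv_bchain (n m d : Int) (cities towers : List Int) (hm : 1 ≤ m) :
    ∀ b : Int, 1 ≤ b → b ≤ m →
    (PySem.List.pyRange 2 (b+1) 1).foldl (pvBBody n m d cities towers)
        [(pvReach m d cities towers).getD 0 0]
    = rowS (covE n d cities towers) (reE d cities towers) b.toNat := by
  intro b hb
  induction b, hb using Int.le_induction with
  | base =>
    intro _
    rw [show (1:Int)+1 = 2 by ring, PySem.List.pyRange_one_eq_nil (le_refl 2)]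
    simp only [List.foldl_nil]
    have h0 : (pvReach m d cities towers).getD 0 0 = reE d cities towers 1 := by
      have := pv_reach_getD m d cities towers 0 (by omega)
      simpa using this
    rw [h0]
    rfl
  | succ b hb ih =>
    intro hble
    rw [PySem.List.pyRange_one_succ_right (by omega : (2:Int) ≤ b+1), List.foldl_append,
      List.foldl_cons, List.foldl_nil, ih (by omega)]
    unfold pvBBody
    rw [pv_cov_eq n d cities towers (b+1)]
    rw [show (b+1-1 : Int) = b by ring]
    have hr : (pvReach m d cities towers).getD b.toNat 0 = reE d cities towers (b+1) := by
      rw [pv_reach_getD m d cities towers b.toNat (by omega)]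
      rw [show ((b.toNat:Int)) = b by omega]
    rw [hr]
    have : ((b+1).toNat) = b.toNat + 1 := by omega
    rw [this, pv_rowS_succ _ _ b.toNat (by omega)]
    rw [show ((b.toNat:Int)+1) = b+1 by omega]
    unfold stepS
    by_cases hcv : covE n d cities towers (b+1) = true
    · rw [if_pos hcv]
    · rw [if_neg hcv]

theorem pv_resFold (g : Int → Int) :
    ∀ c : Int, 0 ≤ c → ∀ res : List Int, c ≤ (res.length:Int) →
    (PySem.List.pyRange 1 (c+1) 1).foldl (fun r i => r.set (i-1).toNat (g i)) res =
    (PySem.List.pyRange 1 (c+1) 1).map g ++ res.drop c.toNat := by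
  intro c hc
  induction c, hc using Int.le_induction with
  | base =>
    intro res h
    rw [show (0:Int)+1 = 1 by ring, PySem.List.pyRange_one_eq_nil (le_refl 1)]
    simp
  | succ c hc ih =>
    intro res hlen
    rw [PySem.List.pyRange_one_succ_right (by omega : (1:Int) ≤ c+1), List.foldl_append,
      List.foldl_cons, List.foldl_nil, ih res (by omega), List.map_append, List.map_cons,
      List.map_nil]
    rw [show (c+1-1 : Int) = c by ring]
    have hlt : c.toNat < res.length := by omega
    have hmaplen : ((PySem.List.pyRange 1 (c+1) 1).map g).length = c.toNat := by
      rw [List.length_map, PySem.List.length_pyRange_one]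
      omega
    rw [List.drop_eq_getElem_cons hlt]
    rw [List.set_append_right _ _ (by omega)]
    rw [hmaplen, Nat.sub_self, List.set_cons_zero]
    rw [show ((c+1).toNat) = c.toNat + 1 by omega]
    simp


theorem pv_A_eq (n m d : Int) (cities towers : List Int) :
    solve_instance n m d cities towers =
    (PySem.List.pyRange 1 (m+1) 1).foldl (fun res i =>
      res.set (i-1).toNat (pvGet2 (pvDp2 n m d cities towers) m.toNat i.toNat))
      (List.replicate m.toNat 0) := rfl

theorem pv_B_eq (n m d : Int) (cities towers : List Int) :
    solve_instance_alt n m d cities towers =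
    if m ≤ 0 then []
    else (PySem.List.pyRange 2 (m+1) 1).foldl (pvBBody n m d cities towers)
      [(pvReach m d cities towers).getD 0 0] := rfl

theorem pv_main (n m d : Int) (cities towers : List Int) :
    solve_instance n m d cities towers = solve_instance_alt n m d cities towers := by
  rw [pv_A_eq, pv_B_eq]
  by_cases hm0 : m ≤ 0
  · rw [if_pos hm0, PySem.List.pyRange_one_eq_nil (by omega : m + 1 ≤ 1)]
    simp [Int.toNat_of_nonpos hm0]
  · have hm : 1 ≤ m := by omega
    rw [if_neg hm0]
    rw [pv_bchain n m d cities towers hm m hm (le_refl m)]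
    obtain ⟨hlen, hrows, hrow, _⟩ := pv_outer n m d cities towers hm (m+1) (by omega) (le_refl (m+1))
    rw [show (m+1-1 : Int) = m by ring] at hrow
    rw [pv_resFold _ m (by omega) _ (by rw [List.length_replicate]; omega)]
    rw [List.drop_of_length_le (by rw [List.length_replicate])]
    rw [List.append_nil]
    apply List.ext_getElem
    · rw [List.length_map, PySem.List.length_pyRange_one, pv_rowS_length]
      omega
    · intro k hk1 hk2
      rw [List.getElem_map, PySem.List.getElem_pyRange_one]
      have hc : ((1 + (k:Int))).toNat = k + 1 := by omega
      rw [hc]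
      have := hrow (k+1)
      rw [if_neg (by omega)] at this
      rw [show (List.foldl (pvABody n m d cities towers) (pvDp1 m d cities towers)
        (PySem.List.pyRange 2 (m + 1))) = pvDp2 n m d cities towers from rfl] at this
      rw [show ((m:Int)).toNat = m.toNat from rfl] at this
      rw [this]
      simp only [Nat.add_sub_cancel]
      rw [List.getD_eq_getElem _ _ (by rw [pv_rowS_length]; rw [List.length_map, PySem.List.length_pyRange_one] at hk1; omega)]

-- ===== VERDICT (by name: the statement is the Claim_ definition above) =====
theorem solve_instance_spec : Claim_equal_solve_instance := by
  intro n m d cities towers _ _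
  show solve_instance n m d cities towers = solve_instance_alt n m d cities towers
  exact pv_main n m d cities towers
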